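-- pv_equiv track=rewrite | github.com/lessej/advent-of-code | python_2025/aoc/solutions/day06.py | chunk_starts
-- ===== SOURCE A (Python) =====
-- def chunk_starts(lines):
--     chunk_starts = []
--     for i in range(len(lines[0])):
--         is_empty = True
--         for j in range(len(lines)):
--             if lines[j][i] != " ":
--                 is_empty = False
--                 break
--         if is_empty:
--             chunk_starts.append(i)
--     return chunk_starts
-- ===== SOURCE B (Python) =====
-- def chunk_starts(lines):
--     n = len(lines[0])
--     dirty = set()
--     for row in lines:
--         for i, ch in enumerate(row[:n]):
--             if ch != " ":
--                 dirty.add(i)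
--     return [i for i in range(n) if i not in dirty]
-- ===== Notes on version B (the rewrite author's own statement) =====
-- stated objective: idiomatic
-- what changed: A scans column-by-column with an inner row loop that breaks at the first non-space; B makes one row-major pass collecting the set of dirty (non-space) columns and then lists the column indices not in that set.
import Mathlib
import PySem

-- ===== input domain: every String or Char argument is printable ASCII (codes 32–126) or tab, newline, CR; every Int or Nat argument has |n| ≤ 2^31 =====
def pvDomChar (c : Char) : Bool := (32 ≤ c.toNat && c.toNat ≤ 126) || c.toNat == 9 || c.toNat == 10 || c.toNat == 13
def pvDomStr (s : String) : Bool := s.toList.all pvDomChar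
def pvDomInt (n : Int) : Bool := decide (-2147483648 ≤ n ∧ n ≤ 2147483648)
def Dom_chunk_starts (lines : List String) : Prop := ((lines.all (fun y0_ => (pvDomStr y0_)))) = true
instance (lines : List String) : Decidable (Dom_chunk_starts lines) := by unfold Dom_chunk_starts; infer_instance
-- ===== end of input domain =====

-- B replaces A's per-column scan-with-break by a single row-major pass building a set of
-- dirty columns, then emits the clean column indices (objective: idiomatic, same cost).

-- ===== PORT A =====
-- inner 'for j in range(len(lines))' loop with break: none = IndexError on lines[j][i]
def chunkInner : List String → Int → Option Bool
  | [], _ => some true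
  | s :: rest, i =>
    match PySem.Str.pyGet? s i with
    | none => none
    | some c => if c ≠ ' ' then some false else chunkInner rest i

def chunk_starts (lines : List String) : List Int :=
  (match PySem.List.pyGet? lines 0 with
   | none => none      -- lines[0] raises IndexError; unreachable under Pre_
   | some first =>
     (PySem.List.pyRange 0 (PySem.Str.len first) 1).foldl
       (fun acc i =>
         match acc with
         | none => none
         | some r =>
           match chunkInner lines i with
           | none => none
           | some b => if b then some (r ++ [i]) else some r)
       (some ([] : List Int))).getD []

-- ===== PORT B =====
-- 'for i, ch in enumerate(row[:n]): if ch != " ": dirty.add(i)'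
def dirtyRow (d : PySem.Set Int) (row : String) (n : Int) : PySem.Set Int :=
  (PySem.List.enumerate (PySem.Str.slice row none (some n)).toList 0).foldl
    (fun d p => if p.2 ≠ ' ' then PySem.Set.add d p.1 else d) d

def chunk_starts_alt (lines : List String) : List Int :=
  match PySem.List.pyGet? lines 0 with
  | none => []          -- len(lines[0]) raises IndexError; unreachable under Pre_
  | some first =>
    let n := PySem.Str.len first
    let dirty : PySem.Set Int := lines.foldl (fun d row => dirtyRow d row n) PySem.Set.empty
    (PySem.List.pyRange 0 n 1).filter (fun i => !(PySem.Set.contains dirty i))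

-- ===== PRECONDITION & SPEC =====
-- Pre_ excludes exactly the inputs where A raises IndexError: the empty list (lines[0]),
-- and ragged inputs where some column scan reaches a row shorter than the column index
-- before meeting a non-space character (lines[j][i]).
def Pre_chunk_starts (lines : List String) : Prop :=
  lines ≠ [] ∧ ∀ i < (lines.headD "").toList.length, ∀ j < lines.length,
    ((lines.getD j "").toList.length ≤ i →
      ∃ j' < j, i < (lines.getD j' "").toList.length ∧ (lines.getD j' "").toList.getD i ' ' ≠ ' ')
instance (lines : List String) : Decidable (Pre_chunk_starts lines) := by
  unfold Pre_chunk_starts; infer_instance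

def pvWitness_chunk_starts : List String := ["ab c ", "x  y "]

def Spec_chunk_starts (lines : List String) (out : List Int) : Prop := out = chunk_starts_alt lines
instance (lines : List String) (out : List Int) : Decidable (Spec_chunk_starts lines out) := by
  unfold Spec_chunk_starts; infer_instance

-- ===== CLAIM (what is proved, stated in full; the proofs are below) =====
def Claim_equal_chunk_starts : Prop := ∀ (lines : List String), Dom_chunk_starts lines → Pre_chunk_starts lines → Spec_chunk_starts lines (chunk_starts lines)
-- ===== LEMMAS AND PROOFS =====

-- a column is clean iff every row that has a character at index k has a space there
def colEmpty (lines : List String) (k : Nat) : Bool :=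
  lines.all (fun s => s.toList.getD k ' ' == ' ')

-- inner-loop safety at column k: the scan never indexes past a row's end before breaking
def SafeCol : List String → Nat → Prop
  | [], _ => True
  | s :: rest, k => k < s.toList.length ∧ (s.toList.getD k ' ' = ' ' → SafeCol rest k)

theorem pre_safe (rows : List String) (k : Nat)
    (h : ∀ j < rows.length, ((rows.getD j "").toList.length ≤ k →
      ∃ j' < j, k < (rows.getD j' "").toList.length ∧ (rows.getD j' "").toList.getD k ' ' ≠ ' ')) :
    SafeCol rows k := by
  induction rows with
  | nil => trivial
  | cons s rest ih =>
    constructor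
    · by_contra hlen
      obtain ⟨j', hj', _⟩ := h 0 (by simp) (by simpa using Nat.le_of_not_lt hlen)
      omega
    · intro hsp
      apply ih
      intro j hj hshort
      obtain ⟨j', hj', hlt, hne⟩ := h (j+1) (by simpa using hj) (by simpa using hshort)
      cases j' with
      | zero => exact absurd hsp (by simpa using hne)
      | succ j'' => exact ⟨j'', by omega, by simpa using hlt, by simpa using hne⟩

theorem chunkInner_eq (rows : List String) (k : Nat) (hs : SafeCol rows k) :
    chunkInner rows (k : Int) = some (colEmpty rows k) := by
  induction rows with
  | nil => simp [chunkInner, colEmpty]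
  | cons s rest ih =>
    obtain ⟨hlt, hrec⟩ := hs
    obtain ⟨c, hc⟩ : ∃ c, s.toList[k]? = some c := ⟨_, List.getElem?_eq_getElem hlt⟩
    have hcD : s.toList.getD k ' ' = c := by simp [List.getD, hc]
    by_cases hsp : c = ' '
    · rw [chunkInner, PySem.Str.pyGet?_natCast, hc]
      simp [hsp, colEmpty, hc, ih (hrec (by rw [hcD, hsp]))]
    · rw [chunkInner, PySem.Str.pyGet?_natCast, hc]
      simp [hsp, colEmpty, hc]

theorem foldlA_eq (lines : List String) (L : List Int) (r : List Int)
    (h : ∀ i ∈ L, 0 ≤ i ∧ SafeCol lines i.toNat) :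
    L.foldl
      (fun acc i =>
        match acc with
        | none => none
        | some r =>
          match chunkInner lines i with
          | none => none
          | some b => if b then some (r ++ [i]) else some r)
      (some r) = some (r ++ L.filter (fun i => colEmpty lines i.toNat)) := by
  induction L generalizing r with
  | nil => simp
  | cons a L ih =>
    obtain ⟨ha0, hsafe⟩ := h a (by simp)
    have hA : chunkInner lines a = some (colEmpty lines a.toNat) := by
      have := chunkInner_eq lines a.toNat hsafe
      rwa [Int.toNat_of_nonneg ha0] at this
    have hrest : ∀ i ∈ L, 0 ≤ i ∧ SafeCol lines i.toNat :=
      fun i hi => h i (List.mem_cons_of_mem _ hi)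
    by_cases hc : colEmpty lines a.toNat
    · simp only [List.foldl_cons, hA, hc]
      rw [if_pos trivial, ih _ hrest, List.filter_cons]
      simp [hc]
    · rw [Bool.not_eq_true] at hc
      simp only [List.foldl_cons, hA, hc]
      rw [if_neg (by simp), ih _ hrest, List.filter_cons]
      simp [hc]

theorem mem_foldl_add_if (ps : List (Int × Char)) (d : PySem.Set Int) (y : Int) :
    (y ∈ ps.foldl (fun d p => if p.2 ≠ ' ' then PySem.Set.add d p.1 else d) d) ↔
      y ∈ d ∨ ∃ p ∈ ps, p.2 ≠ ' ' ∧ p.1 = y := by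
  induction ps generalizing d with
  | nil => simp
  | cons p ps ih =>
    rw [List.foldl_cons]
    by_cases hc : p.2 = ' '
    · rw [if_neg (by simp [hc]), ih]
      constructor
      · rintro (h | ⟨q, hq, h1, h2⟩)
        · exact Or.inl h
        · exact Or.inr ⟨q, List.mem_cons_of_mem _ hq, h1, h2⟩
      · rintro (h | ⟨q, hq, h1, h2⟩)
        · exact Or.inl h
        · rcases List.mem_cons.mp hq with rfl | hq
          · exact absurd hc h1
          · exact Or.inr ⟨q, hq, h1, h2⟩
    · rw [if_pos (by simp [hc]), ih]
      simp only [PySem.Set.mem_add]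
      constructor
      · rintro ((h | h) | ⟨q, hq, h1, h2⟩)
        · exact Or.inl h
        · exact Or.inr ⟨p, List.mem_cons_self, hc, h.symm⟩
        · exact Or.inr ⟨q, List.mem_cons_of_mem _ hq, h1, h2⟩
      · rintro (h | ⟨q, hq, h1, h2⟩)
        · exact Or.inl (Or.inl h)
        · rcases List.mem_cons.mp hq with rfl | hq
          · exact Or.inl (Or.inr h2.symm)
          · exact Or.inr ⟨q, hq, h1, h2⟩

theorem mem_dirtyRow (row : String) (n : Int) (hn : 0 ≤ n) (d : PySem.Set Int) (y : Int) :
    y ∈ dirtyRow d row n ↔ y ∈ d ∨ ∃ k : Nat,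
      k < (row.toList.take n.toNat).length ∧ (k : Int) = y ∧
      (row.toList.take n.toNat).getD k ' ' ≠ ' ' := by
  have hslice : (PySem.Str.slice row none (some n)).toList = row.toList.take n.toNat := by
    simp [PySem.List.slice_to _ hn]
  unfold dirtyRow
  rw [hslice, mem_foldl_add_if]
  constructor
  · rintro (h | ⟨p, hp, h1, h2⟩)
    · exact Or.inl h
    · obtain ⟨k, hk, rfl⟩ := (PySem.List.mem_enumerate_iff _ _ _).mp hp
      exact Or.inr ⟨k, hk, by simpa using h2,
        by simpa [List.getD, List.getElem?_eq_getElem hk] using h1⟩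
  · rintro (h | ⟨k, hk, h1, h2⟩)
    · exact Or.inl h
    · refine Or.inr ⟨((k : Int), (row.toList.take n.toNat)[k]'hk), ?_, ?_, by simpa using h1⟩
      · exact (PySem.List.mem_enumerate_iff _ _ _).mpr ⟨k, hk, by simp⟩
      · simpa [List.getD, List.getElem?_eq_getElem hk] using h2

theorem mem_dirty (lines : List String) (n : Int) (hn : 0 ≤ n) (d : PySem.Set Int) (y : Int) :
    (y ∈ lines.foldl (fun d row => dirtyRow d row n) d) ↔
      y ∈ d ∨ ∃ row ∈ lines, ∃ k : Nat,
        k < (row.toList.take n.toNat).length ∧ (k : Int) = y ∧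
        (row.toList.take n.toNat).getD k ' ' ≠ ' ' := by
  induction lines generalizing d with
  | nil => simp
  | cons row rows ih =>
    rw [List.foldl_cons, ih, mem_dirtyRow _ _ hn]
    constructor
    · rintro ((h | ⟨k, hk, h1, h2⟩) | ⟨r, hr, k, hk, h1, h2⟩)
      · exact Or.inl h
      · exact Or.inr ⟨row, List.mem_cons_self, k, hk, h1, h2⟩
      · exact Or.inr ⟨r, List.mem_cons_of_mem _ hr, k, hk, h1, h2⟩
    · rintro (h | ⟨r, hr, k, hk, h1, h2⟩)
      · exact Or.inl (Or.inl h)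
      · rcases List.mem_cons.mp hr with rfl | hr
        · exact Or.inl (Or.inr ⟨k, hk, h1, h2⟩)
        · exact Or.inr ⟨r, hr, k, hk, h1, h2⟩

theorem contains_dirty (lines : List String) (n : Int) (k : Nat) (hk : (k : Int) < n) :
    PySem.Set.contains (lines.foldl (fun d row => dirtyRow d row n) PySem.Set.empty) (k : Int)
      = !colEmpty lines k := by
  have hn : 0 ≤ n := le_trans (Int.natCast_nonneg k) (le_of_lt hk)
  rcases Bool.eq_false_or_eq_true (colEmpty lines k) with hE | hE
  · -- clean column: no row contributes k to dirty
    rw [hE]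
    simp only [Bool.not_true]
    rw [Bool.eq_false_iff]
    intro hcon
    rw [PySem.Set.contains_iff, mem_dirty _ _ hn] at hcon
    rcases hcon with h | ⟨r, hr, k', hk', h1, h2⟩
    · simp [PySem.Set.empty] at h
    · have hkk : k' = k := by exact_mod_cast h1
      rw [hkk] at hk' h2
      have hall : ∀ x ∈ lines, x.toList[k]?.getD ' ' = ' ' := by
        intro x hx
        have := (List.all_eq_true.mp hE) x hx
        simpa [colEmpty, List.getD] using this
      rw [List.getD, List.getElem?_take_of_lt
        (by simp only [List.length_take] at hk'; omega)] at h2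
      exact h2 (hall r hr)
  · -- dirty column: the offending row witnesses membership
    have hnall : ¬ ∀ x ∈ lines, x.toList[k]?.getD ' ' = ' ' := by
      intro hall
      have hT : colEmpty lines k = true := by
        simp only [colEmpty, List.all_eq_true]
        intro x hx
        simpa [List.getD] using hall x hx
      rw [hE] at hT
      exact Bool.false_ne_true hT
    rcases not_forall.mp hnall with ⟨s, hs2⟩
    rcases not_forall.mp hs2 with ⟨hs, hchar⟩

    have hlen : k < s.toList.length := by
      by_contra h
      exact hchar (by simp [List.getElem?_eq_none (Nat.le_of_not_lt h)])
    rw [hE]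
    simp only [Bool.not_false]
    rw [PySem.Set.contains_iff, mem_dirty _ _ hn]
    refine Or.inr ⟨s, hs, k, ?_, rfl, ?_⟩
    · simp only [List.length_take]
      omega
    · rw [List.getD, List.getElem?_take_of_lt (by omega)]
      simpa using hchar

-- ===== VERDICT (by name: the statement is the Claim_ definition above) =====
theorem chunk_starts_spec : Claim_equal_chunk_starts := by
  intro lines _ hPre
  obtain ⟨hne, hcols⟩ := hPre
  obtain ⟨first, rest, rfl⟩ : ∃ f r, lines = f :: r := by
    cases lines with
    | nil => exact absurd rfl hne
    | cons f r => exact ⟨f, r, rfl⟩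
  unfold Spec_chunk_starts
  have hn : PySem.Str.len first = (first.toList.length : Int) := by simp
  have hsafe : ∀ i ∈ PySem.List.pyRange 0 (PySem.Str.len first) 1,
      0 ≤ i ∧ SafeCol (first :: rest) i.toNat := by
    intro i hi
    rw [PySem.List.mem_pyRange_one] at hi
    refine ⟨hi.1, pre_safe _ _ ?_⟩
    intro j hj hshort
    have hilt : i.toNat < first.toList.length := by
      rw [hn] at hi; omega
    simpa using hcols i.toNat (by simpa using hilt) j hj hshort
  simp only [chunk_starts, chunk_starts_alt, PySem.List.pyGet?_zero_cons]
  rw [foldlA_eq _ _ _ hsafe]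
  simp only [Option.getD_some, List.nil_append]
  apply List.filter_congr
  intro i hi
  rw [PySem.List.mem_pyRange_one] at hi
  obtain ⟨k, rfl⟩ : ∃ k : Nat, i = (k : Int) := ⟨i.toNat, (Int.toNat_of_nonneg hi.1).symm⟩
  rw [contains_dirty _ _ _ hi.2]
  simp
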